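-- pv_equiv track=rewrite | github.com/quic/ai-hub-models | qai_hub_models/utils/scorecard/model_card.py | chipset_marketing_name
-- ===== SOURCE A (Python) =====
-- def chipset_marketing_name(chipset) -> str:
--     """Sanitize chip name to match marketting."""
--     chip = [word.capitalize() for word in chipset.split("-")]
--     details_to_remove = []
--     for i in range(len(chip)):
--         if chip[i] == "8gen3":
--             chip[i] = "8 Gen 3"
--         if chip[i] == "8gen2":
--             chip[i] = "8 Gen 2"
--         elif chip[i] == "8gen1":
--             chip[i] = "8 Gen 1"
--         elif chip[i] == "Snapdragon":
--             # Marketing name for Qualcomm Snapdragon is Snapdragon®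
--             chip[i] = "Snapdragon®"
--         elif chip[i] == "Qualcomm":
--             details_to_remove.append(chip[i])
--
--     for detail in details_to_remove:
--         chip.remove(detail)
--     return " ".join(chip)
-- ===== SOURCE B (Python) =====
-- def chipset_marketing_name(chipset) -> str:
--     """Sanitize chip name to match marketting."""
--     replacements = {
--         "8gen3": "8 Gen 3",
--         "8gen2": "8 Gen 2",
--         "8gen1": "8 Gen 1",
--         "Snapdragon": "Snapdragon\u00ae",
--     }
--     out = []
--     for word in chipset.split("-"):
--         cap = word.capitalize()
--         if cap == "Qualcomm":
--             continue
--         out.append(replacements.get(cap, cap))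
--     return " ".join(out)
-- ===== Notes on version B (the rewrite author's own statement) =====
-- stated objective: simpler
-- what changed: Replaces A's two-phase algorithm (index loop mutating the list plus a second removal loop driven by a details_to_remove list) with a single filtering pass that skips 'Qualcomm' tokens and maps the rest through a replacement dict.
import Mathlib
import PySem

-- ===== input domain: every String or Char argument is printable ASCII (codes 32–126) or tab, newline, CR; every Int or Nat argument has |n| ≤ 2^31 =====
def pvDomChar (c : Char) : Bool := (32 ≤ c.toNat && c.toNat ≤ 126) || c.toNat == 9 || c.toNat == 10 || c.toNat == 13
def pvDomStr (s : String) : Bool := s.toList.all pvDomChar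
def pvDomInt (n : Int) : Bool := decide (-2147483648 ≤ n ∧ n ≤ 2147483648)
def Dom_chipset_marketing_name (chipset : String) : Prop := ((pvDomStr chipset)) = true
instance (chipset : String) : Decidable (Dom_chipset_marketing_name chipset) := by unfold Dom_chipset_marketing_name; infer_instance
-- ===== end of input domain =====

-- B replaces A's two-phase mutate-then-remove algorithm by a single filtering pass over the
-- split words with a replacement dict (objective: simpler).

-- str.capitalize: first char uppercased, the rest lowercased — exact on the ASCII domain
def pyCapitalize (s : String) : String :=
  match s.toList with
  | [] => ""
  | c :: cs => String.ofList (PySem.Chars.upperChar c :: cs.map PySem.Chars.lowerChar)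

-- ===== PORT A =====
def chipset_marketing_name (chipset : String) : String :=
  -- chipset.split("-"): sep "-" ≠ "" so split? is never none
  let chip0 := ((PySem.Str.split? chipset "-").getD []).map pyCapitalize
  -- for i in range(len(chip)): each iteration rewrites chip[i] in place (reading only chip[i])
  -- and may record it in details_to_remove; folded left over the list with state (chip-so-far, details)
  let st := chip0.foldl (fun (st : List String × List String) w =>
    let w1 := if w = "8gen3" then "8 Gen 3" else w
    if w1 = "8gen2" then (st.1 ++ ["8 Gen 2"], st.2)
    else if w1 = "8gen1" then (st.1 ++ ["8 Gen 1"], st.2)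
    else if w1 = "Snapdragon" then (st.1 ++ ["Snapdragon®"], st.2)
    else if w1 = "Qualcomm" then (st.1 ++ [w1], st.2 ++ [w1])
    else (st.1 ++ [w1], st.2)) (([] : List String), ([] : List String))
  -- for detail in details_to_remove: chip.remove(detail)
  -- (remove? is none only on ValueError; every recorded detail is in chip, so getD's default is never taken)
  let chip2 := st.2.foldl (fun c d => (PySem.List.remove? c d).getD c) st.1
  PySem.Str.join " " chip2

-- ===== PORT B =====
def pvRepl : PySem.Dict String String :=
  ((((PySem.Dict.empty).insert "8gen3" "8 Gen 3").insert "8gen2" "8 Gen 2").insert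
      "8gen1" "8 Gen 1").insert "Snapdragon" "Snapdragon®"

def chipset_marketing_name_alt (chipset : String) : String :=
  let out := ((PySem.Str.split? chipset "-").getD []).foldl (fun out w =>
    let cap := pyCapitalize w
    if cap = "Qualcomm" then out else out ++ [pvRepl.getD cap cap]) []
  PySem.Str.join " " out

-- ===== PRECONDITION & SPEC =====
def Spec_chipset_marketing_name (chipset : String) (out : String) : Prop := out = chipset_marketing_name_alt chipset
instance (chipset : String) (out : String) : Decidable (Spec_chipset_marketing_name chipset out) := by unfold Spec_chipset_marketing_name; infer_instance

-- ===== CLAIM (what is proved, stated in full; the proofs are below) =====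
def Claim_equal_chipset_marketing_name : Prop := ∀ (chipset : String), Dom_chipset_marketing_name chipset → Spec_chipset_marketing_name chipset (chipset_marketing_name chipset)

-- ===== LEMMAS AND PROOFS =====

-- the per-word replacement A's index loop performs
def pvFA (w : String) : String :=
  if w = "8gen3" then "8 Gen 3"
  else if w = "8gen2" then "8 Gen 2"
  else if w = "8gen1" then "8 Gen 1"
  else if w = "Snapdragon" then "Snapdragon®"
  else w

lemma pvFA_eq_qualcomm (w : String) : (pvFA w = "Qualcomm") ↔ (w = "Qualcomm") := by
  unfold pvFA
  split_ifs with h1 h2 h3 h4 <;> simp_all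

lemma pvRepl_getD (s : String) : pvRepl.getD s s = pvFA s := by
  unfold pvRepl pvFA
  rw [PySem.Dict.getD_insert, PySem.Dict.getD_insert, PySem.Dict.getD_insert,
    PySem.Dict.getD_insert, PySem.Dict.getD_empty]
  by_cases h1 : s = "8gen3"
  · subst h1; simp
  · by_cases h2 : s = "8gen2"
    · subst h2; simp
    · by_cases h3 : s = "8gen1"
      · subst h3; simp
      · by_cases h4 : s = "Snapdragon"
        · subst h4; simp
        · simp [h1, h2, h3, h4]

lemma pvFoldA_eq (l : List String) (a b : List String) :
    l.foldl (fun (st : List String × List String) w =>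
      let w1 := if w = "8gen3" then "8 Gen 3" else w
      if w1 = "8gen2" then (st.1 ++ ["8 Gen 2"], st.2)
      else if w1 = "8gen1" then (st.1 ++ ["8 Gen 1"], st.2)
      else if w1 = "Snapdragon" then (st.1 ++ ["Snapdragon®"], st.2)
      else if w1 = "Qualcomm" then (st.1 ++ [w1], st.2 ++ [w1])
      else (st.1 ++ [w1], st.2)) (a, b)
    = (a ++ l.map pvFA, b ++ l.filter (fun w => w == "Qualcomm")) := by
  induction l generalizing a b with
  | nil => simp
  | cons w l ih =>
    simp only [List.foldl_cons, List.map_cons, List.filter_cons]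
    by_cases h1 : w = "8gen3"
    · subst h1; simp [ih, pvFA]
    · by_cases h2 : w = "8gen2"
      · subst h2; simp [ih, pvFA]
      · by_cases h3 : w = "8gen1"
        · subst h3; simp [ih, pvFA]
        · by_cases h4 : w = "Snapdragon"
          · subst h4; simp [ih, pvFA]
          · by_cases h5 : w = "Qualcomm"
            · subst h5; simp [ih, pvFA]
            · simp [h1, h2, h3, h4, h5, ih, pvFA]

lemma pvEraseFilter (v : String) (c : List String) :
    (c.erase v).filter (fun x => !(x == v)) = c.filter (fun x => !(x == v)) := by
  induction c with
  | nil => simp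
  | cons x c ih =>
    by_cases h : x = v
    · subst h; simp [List.erase_cons_head]
    · rw [List.erase_cons_tail (by simpa using h)]
      simp only [List.filter_cons]
      have hb : (x == v) = false := by simpa using h
      simp only [hb, Bool.not_false, ih]

lemma pvFoldRemove (k : Nat) : ∀ (c : List String) (v : String), c.count v = k →
    (List.replicate k v).foldl (fun c d => (PySem.List.remove? c d).getD c) c
      = c.filter (fun x => !(x == v)) := by
  induction k with
  | zero =>
    intro c v h
    have hv : v ∉ c := by rwa [← List.count_eq_zero]
    simp only [List.replicate, List.foldl_nil]
    rw [List.filter_eq_self.mpr]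
    intro x hx
    simp only [Bool.not_eq_eq_eq_not, Bool.not_true, beq_eq_false_iff_ne]
    exact fun hxv => hv (hxv ▸ hx)
  | succ k ih =>
    intro c v h
    have hv : v ∈ c := by
      rw [← List.count_pos_iff]; omega
    have hrem : PySem.List.remove? c v = some (c.erase v) :=
      PySem.List.remove?_eq_some_erase c v hv
    have hcnt : (c.erase v).count v = k := by
      rw [List.count_erase_self]; omega
    simp only [List.replicate_succ, List.foldl_cons, hrem, Option.getD_some]
    rw [ih _ _ hcnt, pvEraseFilter]

lemma pvFoldB_eq (l : List String) (acc : List String) :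
    l.foldl (fun out w =>
      let cap := pyCapitalize w
      if cap = "Qualcomm" then out else out ++ [pvRepl.getD cap cap]) acc
    = acc ++ ((l.map pyCapitalize).filter (fun x => !(x == "Qualcomm"))).map pvFA := by
  induction l generalizing acc with
  | nil => simp
  | cons w l ih =>
    simp only [List.foldl_cons, List.map_cons, List.filter_cons]
    by_cases h : pyCapitalize w = "Qualcomm"
    · simp [h, ih]
    · have hb : (pyCapitalize w == "Qualcomm") = false := by simpa using h
      simp only [if_neg h, hb, Bool.not_false, if_true]
      rw [ih, pvRepl_getD]
      simp

lemma pvBeq_pvFA (x : String) : (pvFA x == "Qualcomm") = (x == "Qualcomm") := by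
  by_cases h : x = "Qualcomm"
  · subst h
    have : pvFA "Qualcomm" = "Qualcomm" := (pvFA_eq_qualcomm _).mpr rfl
    simp [this]
  · have hf : ¬ pvFA x = "Qualcomm" := fun hf => h ((pvFA_eq_qualcomm x).mp hf)
    simp [h, hf]

lemma pvFilterMapFA (l : List String) :
    (l.map pvFA).filter (fun x => !(x == "Qualcomm"))
      = (l.filter (fun x => !(x == "Qualcomm"))).map pvFA := by
  rw [List.filter_map]
  congr 1
  apply List.filter_congr
  intro x _
  simp only [Function.comp_apply, pvBeq_pvFA]

lemma pvCountMapFA (l : List String) :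
    (l.map pvFA).count "Qualcomm" = l.count "Qualcomm" := by
  simp only [List.count, List.countP_map]
  apply List.countP_congr
  intro x _
  simp only [Function.comp_apply, pvBeq_pvFA]

-- ===== VERDICT (by name: the statement is the Claim_ definition above) =====
theorem chipset_marketing_name_spec : Claim_equal_chipset_marketing_name := by
  intro chipset _
  show chipset_marketing_name chipset = chipset_marketing_name_alt chipset
  simp only [chipset_marketing_name, chipset_marketing_name_alt]
  rw [pvFoldA_eq, pvFoldB_eq]
  simp only [List.nil_append]
  rw [List.filter_beq "Qualcomm", ← pvCountMapFA,
    pvFoldRemove _ _ _ rfl, pvFilterMapFA]
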